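-- pv_equiv track=rewrite | github.com/biyotteu/gunJJang | back/back/src/utils/maketime.py | update_group_limits
-- ===== SOURCE A (Python) =====
-- def update_group_limits(completed_courses, priority_groups, msc_courses, group_limits):
--     for course_id_prefix, course_name, course_credits in completed_courses:
--         for group_name, group in priority_groups.items():
--             group_courses = [c.strip().replace(" ", "") for c in group]
--             if course_name in group_courses:
--                 group_limits[group_name] -= 1
--                 if group_limits[group_name] < 0:
--                     group_limits[group_name] = 0
--
--         if course_name in [c.strip().replace(" ", "") for c in msc_courses]:
--             group_limits["MSC"] -= course_credits
--             if group_limits["MSC"] < 0: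
--                 group_limits["MSC"] = 0
--     return group_limits
-- ===== SOURCE B (Python) =====
-- def update_group_limits(completed_courses, priority_groups, msc_courses, group_limits):
--     counts = {}
--     for _, course_name, _ in completed_courses:
--         counts[course_name] = counts.get(course_name, 0) + 1
--     for group_name, group in priority_groups.items():
--         members = {c.strip().replace(" ", "") for c in group}
--         n = sum(counts.get(m, 0) for m in members)
--         if n:
--             group_limits[group_name] = max(group_limits[group_name] - n, 0)
--     msc_set = {c.strip().replace(" ", "") for c in msc_courses}
--     matched = [credits for _, name, credits in completed_courses if name in msc_set]
--     if matched:
--         lim = group_limits["MSC"]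
--         for c in matched:
--             lim = max(lim - c, 0)
--         group_limits["MSC"] = lim
--     return group_limits
-- ===== Notes on version B (the rewrite author's own statement) =====
-- stated objective: faster
-- what changed: A re-normalizes every group's member list for every completed course inside a nested loop and decrements limits one course at a time; B builds a name counter in one pass, normalizes each group once, and applies a single clamped subtraction per group (plus one clamped fold for MSC credits), removing the course x group re-normalization work.
import Mathlib
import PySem

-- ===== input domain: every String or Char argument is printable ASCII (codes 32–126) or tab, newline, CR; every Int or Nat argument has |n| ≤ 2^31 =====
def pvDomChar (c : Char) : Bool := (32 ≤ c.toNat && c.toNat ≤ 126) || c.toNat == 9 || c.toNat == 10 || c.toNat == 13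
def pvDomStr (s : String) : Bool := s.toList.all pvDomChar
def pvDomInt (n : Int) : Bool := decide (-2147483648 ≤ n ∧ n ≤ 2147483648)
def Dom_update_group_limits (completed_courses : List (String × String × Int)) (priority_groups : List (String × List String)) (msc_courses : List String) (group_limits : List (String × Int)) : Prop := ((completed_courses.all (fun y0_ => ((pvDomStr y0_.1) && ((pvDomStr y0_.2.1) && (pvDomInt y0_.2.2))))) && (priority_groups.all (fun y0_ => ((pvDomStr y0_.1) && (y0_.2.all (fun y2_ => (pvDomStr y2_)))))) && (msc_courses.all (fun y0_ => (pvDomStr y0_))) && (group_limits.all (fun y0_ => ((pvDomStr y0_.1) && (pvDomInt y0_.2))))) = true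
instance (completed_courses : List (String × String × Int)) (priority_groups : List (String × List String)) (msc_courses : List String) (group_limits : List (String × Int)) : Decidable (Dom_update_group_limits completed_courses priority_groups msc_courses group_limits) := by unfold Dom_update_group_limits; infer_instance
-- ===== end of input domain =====

-- B replaces A's per-course re-normalization and unit decrements by a one-pass name counter,
-- one normalization per group, and a single clamped subtraction per group (objective: faster).
-- Both Pythons mutate the group_limits dict in place in the same way; the equivalence proved
-- here is about the returned dict (which is that same object).

-- c.strip().replace(" ", "")  (shared by both ports and by Pre_)
def pvNorm (s : String) : String := PySem.Str.replace (PySem.Str.strip s) " " ""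

-- ===== PORT A =====
def update_group_limits (completed_courses : List (String × String × Int)) (priority_groups : List (String × List String)) (msc_courses : List String) (group_limits : List (String × Int)) : List (String × Int) :=
  ((completed_courses.foldl (fun d c =>
      let d1 := (PySem.Dict.ofList priority_groups).items.foldl (fun d p =>
        if c.2.1 ∈ p.2.map pvNorm then
          -- group_limits[group_name] -= 1  (KeyError when the key is absent: excluded by Pre_)
          match d.get? p.1 with
          | none => d
          | some v =>
            if (d.insert p.1 (v - 1)).getD p.1 0 < 0 then (d.insert p.1 (v - 1)).insert p.1 0
            else d.insert p.1 (v - 1)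
        else d) d
      if c.2.1 ∈ msc_courses.map pvNorm then
        -- group_limits["MSC"] -= course_credits  (KeyError when absent: excluded by Pre_)
        match d1.get? "MSC" with
        | none => d1
        | some v =>
          if (d1.insert "MSC" (v - c.2.2)).getD "MSC" 0 < 0 then (d1.insert "MSC" (v - c.2.2)).insert "MSC" 0
          else d1.insert "MSC" (v - c.2.2)
      else d1)
    (PySem.Dict.ofList group_limits)) : PySem.Dict String Int).items

-- ===== PORT B =====
def update_group_limits_alt (completed_courses : List (String × String × Int)) (priority_groups : List (String × List String)) (msc_courses : List String) (group_limits : List (String × Int)) : List (String × Int) :=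
  let counts : PySem.Dict String Int :=
    completed_courses.foldl (fun d c => d.insert c.2.1 (d.getD c.2.1 0 + 1)) PySem.Dict.empty
  let d1 := (PySem.Dict.ofList priority_groups).items.foldl (fun d p =>
      let members : PySem.Set String := PySem.Set.ofList (p.2.map pvNorm)
      let n : Int := (members.map (fun m => counts.getD m 0)).sum
      if n ≠ 0 then
        -- group_limits[group_name]  (KeyError when the key is absent: excluded by Pre_)
        match d.get? p.1 with
        | none => d
        | some v => d.insert p.1 (max (v - n) 0)
      else d) ((PySem.Dict.ofList group_limits : PySem.Dict String Int))
  let mscSet : PySem.Set String := PySem.Set.ofList (msc_courses.map pvNorm)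
  let matched := (completed_courses.filter (fun c => c.2.1 ∈ mscSet)).map (fun c => c.2.2)
  (if matched ≠ [] then
    -- group_limits["MSC"]  (KeyError when absent: excluded by Pre_)
    match d1.get? "MSC" with
    | none => d1
    | some v => d1.insert "MSC" (matched.foldl (fun a c => max (a - c) 0) v)
  else d1).items

-- ===== PRECONDITION & SPEC =====
-- Pre_ excludes (a) the KeyError inputs: a priority group (or the MSC pool) is matched by some
-- completed course while group_limits lacks that group's key (resp. "MSC"); and (b) the corner
-- where a priority group is itself named "MSC", some completed course
-- actually matches that group's members, and a completed course matching msc_courses carries a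
-- negative credit — there the result depends on the accidental interleaving of the clamped
-- "MSC" updates, and A's and B's orders are both defensible.
def Pre_update_group_limits (completed_courses : List (String × String × Int)) (priority_groups : List (String × List String)) (msc_courses : List String) (group_limits : List (String × Int)) : Prop :=
  (∀ p ∈ (PySem.Dict.ofList priority_groups : PySem.Dict String (List String)).items,
      (∃ c ∈ completed_courses, c.2.1 ∈ p.2.map pvNorm) → p.1 ∈ group_limits.map Prod.fst) ∧
  ((∃ c ∈ completed_courses, c.2.1 ∈ msc_courses.map pvNorm) → "MSC" ∈ group_limits.map Prod.fst) ∧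
  ("MSC" ∉ priority_groups.map Prod.fst
    ∨ (∀ c ∈ completed_courses, c.2.1 ∈ msc_courses.map pvNorm → 0 ≤ c.2.2)
    ∨ (∀ p ∈ (PySem.Dict.ofList priority_groups : PySem.Dict String (List String)).items,
         p.1 = "MSC" → ∀ c ∈ completed_courses, c.2.1 ∉ p.2.map pvNorm))
instance (completed_courses : List (String × String × Int)) (priority_groups : List (String × List String)) (msc_courses : List String) (group_limits : List (String × Int)) : Decidable (Pre_update_group_limits completed_courses priority_groups msc_courses group_limits) := by unfold Pre_update_group_limits; infer_instance

def pvWitness_update_group_limits : (List (String × String × Int)) × (List (String × List String)) × List String × (List (String × Int)) :=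
  ([("KOR101", "X", 2)], [("G", ["X "])], ["X"], [("G", 3), ("MSC", 5)])

def Spec_update_group_limits (completed_courses : List (String × String × Int)) (priority_groups : List (String × List String)) (msc_courses : List String) (group_limits : List (String × Int)) (out : List (String × Int)) : Prop := out = update_group_limits_alt completed_courses priority_groups msc_courses group_limits
instance (completed_courses : List (String × String × Int)) (priority_groups : List (String × List String)) (msc_courses : List String) (group_limits : List (String × Int)) (out : List (String × Int)) : Decidable (Spec_update_group_limits completed_courses priority_groups msc_courses group_limits out) := by unfold Spec_update_group_limits; infer_instance

-- ===== CLAIM (what is proved, stated in full; the proofs are below) =====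
def Claim_equal_update_group_limits : Prop := ∀ (completed_courses : List (String × String × Int)) (priority_groups : List (String × List String)) (msc_courses : List String) (group_limits : List (String × Int)), Dom_update_group_limits completed_courses priority_groups msc_courses group_limits → Pre_update_group_limits completed_courses priority_groups msc_courses group_limits → Spec_update_group_limits completed_courses priority_groups msc_courses group_limits (update_group_limits completed_courses priority_groups msc_courses group_limits)

-- ===== LEMMAS AND PROOFS =====

-- ---- generic dict-fold machinery ----

-- a fold whose step preserves the key list
theorem pv_foldl_keys_inv {α : Type} (F : PySem.Dict String Int → α → PySem.Dict String Int)
    (h : ∀ d x, (F d x).keys = d.keys) :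
    ∀ (L : List α) (d : PySem.Dict String Int), (L.foldl F d).keys = d.keys := by
  intro L
  induction L with
  | nil => intro d; rfl
  | cons x t ih => intro d; rw [List.foldl_cons, ih, h]

-- canonical per-entry step: possibly update the entry's own (already present) key
def pvStep {β : Type} (G : String × β → Prop) [DecidablePred G] (f : String × β → Int → Int)
    (d : PySem.Dict String Int) (p : String × β) : PySem.Dict String Int :=
  if G p then
    match d.get? p.1 with
    | none => d
    | some v => d.insert p.1 (f p v)
  else d

theorem pvStep_keys {β : Type} (G : String × β → Prop) [DecidablePred G] (f : String × β → Int → Int)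
    (d : PySem.Dict String Int) (p : String × β) : (pvStep G f d p).keys = d.keys := by
  unfold pvStep; split
  · cases hd : d.get? p.1 with
    | none => rfl
    | some v =>
      exact PySem.Dict.keys_insert_of_contains d _ (by rw [PySem.Dict.contains_eq_isSome_get?, hd]; rfl)
  · rfl

theorem pvStep_getD_other {β : Type} (G : String × β → Prop) [DecidablePred G] (f : String × β → Int → Int)
    (d : PySem.Dict String Int) (p : String × β) (k : String) (hne : p.1 ≠ k) :
    (pvStep G f d p).getD k 0 = d.getD k 0 := by
  unfold pvStep; split
  · cases hd : d.get? p.1 with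
    | none => rfl
    | some v => exact PySem.Dict.getD_insert_of_ne d _ _ (Ne.symm hne)
  · rfl

theorem pvStep_getD_self {β : Type} (G : String × β → Prop) [DecidablePred G] (f : String × β → Int → Int)
    (d : PySem.Dict String Int) (p : String × β) (hk : p.1 = k) :
    (pvStep G f d p).getD k 0 = if G p ∧ d.contains k = true then f p (d.getD k 0) else d.getD k 0 := by
  subst hk
  unfold pvStep
  by_cases hG : G p
  · simp only [hG, if_true, true_and]
    cases hd : d.get? p.1 with
    | none =>
      rw [PySem.Dict.contains_eq_isSome_get?, hd]
      simp
    | some v =>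
      rw [PySem.Dict.contains_eq_isSome_get?, hd]
      simp [PySem.Dict.getD_insert_self, PySem.Dict.getD_of_get?_eq_some d 0 hd]
  · simp [hG]

theorem pv_fold_untouched {β : Type} (G : String × β → Prop) [DecidablePred G] (f : String × β → Int → Int)
    (k : String) :
    ∀ (l : List (String × β)) (d : PySem.Dict String Int), (∀ p ∈ l, p.1 ≠ k) →
      (l.foldl (pvStep G f) d).getD k 0 = d.getD k 0 := by
  intro l
  induction l with
  | nil => intro d _; rfl
  | cons p t ih =>
    intro d h
    rw [List.foldl_cons, ih _ (fun q hq => h q (List.mem_cons_of_mem _ hq)),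
        pvStep_getD_other G f d p k (h p (List.mem_cons_self))]

theorem pv_assoc_fold {β : Type} (G : String × β → Prop) [DecidablePred G] (f : String × β → Int → Int) (k : String) :
    ∀ (l : List (String × β)) (d : PySem.Dict String Int), (l.map Prod.fst).Nodup →
      (l.foldl (pvStep G f) d).getD k 0 =
        (match l.find? (fun p => p.1 == k) with
         | some p => if G p ∧ d.contains k = true then f p (d.getD k 0) else d.getD k 0
         | none => d.getD k 0) := by
  intro l
  induction l with
  | nil => intro d _; rfl
  | cons p t ih =>
    intro d hnd
    rw [List.map_cons, List.nodup_cons] at hnd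
    by_cases hpk : p.1 = k
    · rw [List.find?_cons_of_pos (by simp [hpk]), List.foldl_cons,
          pv_fold_untouched G f k t (pvStep G f d p)
            (fun q hq hqk => hnd.1 (by rw [hpk, ← hqk]; exact List.mem_map_of_mem (f := Prod.fst) hq)),
          pvStep_getD_self G f d p hpk]
    · rw [List.find?_cons_of_neg (by simp [hpk]), List.foldl_cons, ih _ hnd.2]
      have hkeys := pvStep_keys G f d p
      have hcont : (pvStep G f d p).contains k = d.contains k := by
        rw [PySem.Dict.contains_eq_decide_mem_keys, PySem.Dict.contains_eq_decide_mem_keys, hkeys]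
      rw [pvStep_getD_other G f d p k hpk, hcont]

-- ---- rewriting the two ports'' loop bodies into canonical steps ----

theorem pvA_inner_canon (name : String) :
    (fun (d : PySem.Dict String Int) (p : String × List String) =>
       if name ∈ p.2.map pvNorm then
         match d.get? p.1 with
         | none => d
         | some v =>
           if (d.insert p.1 (v - 1)).getD p.1 0 < 0 then (d.insert p.1 (v - 1)).insert p.1 0
           else d.insert p.1 (v - 1)
       else d)
    = pvStep (fun p => name ∈ p.2.map pvNorm) (fun _ v => max (v - 1) 0) := by
  funext d p
  unfold pvStep
  by_cases h : name ∈ p.2.map pvNorm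
  · simp only [h, if_true]
    cases hd : d.get? p.1 with
    | none => rfl
    | some v =>
      simp only [PySem.Dict.getD_insert_self, PySem.Dict.insert_insert_self]
      by_cases hv : v - 1 < 0
      · simp only [hv, if_true]; congr 1; omega
      · simp only [hv, if_false]; congr 1; omega
  · simp [h]

theorem pvA_msc_canon (d1 : PySem.Dict String Int) (cr : Int) :
    (match d1.get? "MSC" with
     | none => d1
     | some v =>
       if (d1.insert "MSC" (v - cr)).getD "MSC" 0 < 0 then (d1.insert "MSC" (v - cr)).insert "MSC" 0
       else d1.insert "MSC" (v - cr))
    = (match d1.get? "MSC" with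
       | none => d1
       | some v => d1.insert "MSC" (max (v - cr) 0)) := by
  cases hd : d1.get? "MSC" with
  | none => rfl
  | some v =>
    simp only [PySem.Dict.getD_insert_self, PySem.Dict.insert_insert_self]
    by_cases hv : v - cr < 0
    · simp only [hv, if_true]; congr 1; omega
    · simp only [hv, if_false]; congr 1; omega

-- ---- the per-key scalar model of A''s per-course step ----

def pvPhiA (priority_groups : List (String × List String)) (msc_courses : List String)
    (K0 : List String) (k : String) (v : Int) (c : String × String × Int) : Int :=
  let v1 := match (PySem.Dict.ofList priority_groups).items.find? (fun p => p.1 == k) with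
    | some p => if c.2.1 ∈ p.2.map pvNorm ∧ k ∈ K0 then max (v - 1) 0 else v
    | none => v
  if k = "MSC" ∧ c.2.1 ∈ msc_courses.map pvNorm ∧ "MSC" ∈ K0 then max (v1 - c.2.2) 0 else v1

theorem pv_scalar_transfer {α : Type} (F : PySem.Dict String Int → α → PySem.Dict String Int)
    (φ : Int → α → Int) (K0 : List String) (k : String)
    (h : ∀ d x, d.keys = K0 → (F d x).keys = K0 ∧ (F d x).getD k 0 = φ (d.getD k 0) x) :
    ∀ (L : List α) (d : PySem.Dict String Int), d.keys = K0 →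
      (L.foldl F d).keys = K0 ∧ (L.foldl F d).getD k 0 = L.foldl φ (d.getD k 0) := by
  intro L
  induction L with
  | nil => intro d hd; exact ⟨hd, rfl⟩
  | cons x t ih =>
    intro d hd
    obtain ⟨h1, h2⟩ := h d x hd
    rw [List.foldl_cons, List.foldl_cons, ← h2]
    exact ih (F d x) h1


theorem pvWitness_ok : Dom_update_group_limits pvWitness_update_group_limits.1 pvWitness_update_group_limits.2.1 pvWitness_update_group_limits.2.2.1 pvWitness_update_group_limits.2.2.2 ∧ Pre_update_group_limits pvWitness_update_group_limits.1 pvWitness_update_group_limits.2.1 pvWitness_update_group_limits.2.2.1 pvWitness_update_group_limits.2.2.2 := by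
  constructor <;> decide


-- ---- keys of a dict built from a pair list ----

theorem pv_mem_keys_ofList {ν : Type} (ps : List (String × ν)) (k : String) :
    k ∈ (PySem.Dict.ofList ps).keys ↔ k ∈ ps.map Prod.fst := by
  show k ∈ (PySem.Dict.empty.update ps).keys ↔ _
  rw [PySem.Dict.update, PySem.Dict.keys_foldl_insert_key, PySem.Dict.keys_empty]
  rw [show PySem.Set.update ([] : PySem.Set String) (ps.map Prod.fst)
        = PySem.Set.ofList (ps.map Prod.fst) from (PySem.Set.ofList_eq_foldl _).symm]
  exact PySem.Set.mem_ofList _ _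

-- ---- scalar clamp folds ----

theorem pv_fold_clamp_one {α : Type} :
    ∀ (l : List α), l ≠ [] → ∀ v : Int,
      l.foldl (fun a _ => max (a - 1) 0) v = max (v - l.length) 0 := by
  intro l
  induction l with
  | nil => intro h; exact absurd rfl h
  | cons x t ih =>
    intro _ v
    rw [List.foldl_cons]
    cases t with
    | nil => simp
    | cons y s =>
      rw [ih (by simp) (max (v - 1) 0)]
      simp only [List.length_cons]
      push_cast
      omega

theorem pv_fold_clamp_nonneg :
    ∀ (l : List Int), (∀ c ∈ l, 0 ≤ c) → l ≠ [] → ∀ v : Int,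
      l.foldl (fun a c => max (a - c) 0) v = max (v - l.sum) 0 := by
  intro l
  induction l with
  | nil => intro _ h; exact absurd rfl h
  | cons x t ih =>
    intro hpos _ v
    rw [List.foldl_cons]
    cases t with
    | nil => simp
    | cons y s =>
      rw [ih (fun c hc => hpos c (List.mem_cons_of_mem _ hc)) (by simp) (max (v - x) 0)]
      have hx : 0 ≤ x := hpos x List.mem_cons_self
      have hs : 0 ≤ (y :: s).sum := List.sum_nonneg (fun c hc => hpos c (List.mem_cons_of_mem _ hc))
      simp only [List.sum_cons] at *
      omega

-- interleaved unit decrements and clamped credit subtractions, all amounts nonnegative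
theorem pv_clamp2_fold {α : Type} (P Q : α → Prop) [DecidablePred P] [DecidablePred Q] (cr : α → Int) :
    ∀ (l : List α), (∀ c ∈ l, Q c → 0 ≤ cr c) → ∀ v : Int,
      l.foldl (fun v c => if Q c then max ((if P c then max (v - 1) 0 else v) - cr c) 0
                          else (if P c then max (v - 1) 0 else v)) v
      = if l.countP (fun c => decide (P c)) = 0 ∧ l.filter (fun c => decide (Q c)) = [] then v
        else max (v - ((l.countP (fun c => decide (P c)) : Int)
                        + ((l.filter (fun c => decide (Q c))).map cr).sum)) 0 := by
  intro l
  induction l with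
  | nil => intro _ v; simp
  | cons c t ih =>
    intro hpos v
    have hSt : 0 ≤ ((t.filter (fun c => decide (Q c))).map cr).sum := by
      apply List.sum_nonneg
      intro a ha
      obtain ⟨b, hb, rfl⟩ := List.mem_map.mp ha
      have hbQ := List.of_mem_filter hb
      exact hpos b (List.mem_cons_of_mem _ (List.mem_of_mem_filter hb)) (of_decide_eq_true hbQ)
    have hpos' : ∀ b ∈ t, Q b → 0 ≤ cr b := fun b hb => hpos b (List.mem_cons_of_mem _ hb)
    rw [List.foldl_cons, ih hpos', List.countP_cons, List.filter_cons]
    by_cases hP : P c <;> by_cases hQ : Q c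
    · have hc : 0 ≤ cr c := hpos c List.mem_cons_self hQ
      simp only [hP, hQ, if_true, decide_true, List.map_cons, List.sum_cons]
      split_ifs with h1 h2 h2
      · exact h2.2.elim
      · obtain ⟨hn0, hf0⟩ := h1
        rw [hn0, hf0]
        simp only [List.map_nil, List.sum_nil]
        push_cast
        omega
      · exact h2.2.elim
      · push_cast
        omega
    · have hne : ¬ (t.countP (fun c => decide (P c)) + 1 = 0) := by omega
      simp only [hP, hQ, if_true, if_false, decide_true, decide_false, Bool.false_eq_true]
      split_ifs with h1 h2 h2
      · exact h2.1.elim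
      · obtain ⟨hn0, hf0⟩ := h1
        rw [hn0, hf0]
        simp only [List.map_nil, List.sum_nil]
        push_cast
        omega
      · exact h2.1.elim
      · push_cast
        omega
    · have hc : 0 ≤ cr c := hpos c List.mem_cons_self hQ
      simp only [hP, hQ, if_true, if_false, decide_true, decide_false, Bool.false_eq_true,
        Nat.add_zero, List.map_cons, List.sum_cons]
      split_ifs with h1 h2 h2
      · exact h2.2.elim
      · obtain ⟨hn0, hf0⟩ := h1
        rw [hn0, hf0]
        simp only [List.map_nil, List.sum_nil]
        push_cast
        omega
      · exact h2.2.elim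
      · omega
    · simp only [hP, hQ, if_false, decide_false, Bool.false_eq_true, Nat.add_zero]

-- ---- the counter built by B ----

theorem pv_counts_getD (cc : List (String × String × Int)) (m : String) :
    (cc.foldl (fun d c => d.insert c.2.1 (d.getD c.2.1 0 + 1)) PySem.Dict.empty).getD m 0
      = (((cc.map (fun c => c.2.1)).count m : Nat) : Int) := by
  rw [← List.foldl_map (f := fun c : String × String × Int => c.2.1)
        (g := fun d x => PySem.Dict.insert d x (d.getD x 0 + 1)),
      PySem.Dict.getD_foldl_insert_add_one, PySem.Dict.getD_empty, zero_add]

theorem pv_sum_ite_mem (x : String) :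
    ∀ (ms : List String), ms.Nodup →
      (ms.map (fun m => if m = x then (1 : Int) else 0)).sum = if x ∈ ms then 1 else 0 := by
  intro ms
  induction ms with
  | nil => intro _; simp
  | cons m ms ih =>
    intro hnd
    rw [List.nodup_cons] at hnd
    by_cases hmx : m = x
    · subst hmx
      simp [ih hnd.2, hnd.1]
    · simp only [List.map_cons, List.sum_cons, hmx, if_false, zero_add, ih hnd.2, List.mem_cons]
      have hxm : ¬ (x = m) := fun h => hmx h.symm
      simp [hxm]

theorem pv_sum_set_count (L : List String) (names : List String) :
    ((PySem.Set.ofList L).map (fun m => ((names.count m : Nat) : Int))).sum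
      = ((names.countP (fun x => decide (x ∈ L)) : Nat) : Int) := by
  have hnd : (PySem.Set.ofList L).Nodup := PySem.Set.nodup_ofList L
  have hmem : ∀ m, m ∈ PySem.Set.ofList L ↔ m ∈ L := fun m => PySem.Set.mem_ofList L m
  induction names with
  | nil => simp
  | cons x names ih =>
    have hcnt : ∀ m : String, (((x :: names).count m : Nat) : Int)
        = ((names.count m : Nat) : Int) + (if m = x then (1 : Int) else 0) := by
      intro m
      rw [List.count_cons]
      by_cases h : x = m
      · simp only [beq_iff_eq, h, if_true]
        push_cast
        ring
      · have h2 : ¬ (m = x) := fun e => h e.symm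
        simp [beq_iff_eq, h, h2]
    rw [List.map_congr_left (fun m _ => hcnt m), PySem.List.sum_map_add_int,
        ih, pv_sum_ite_mem x _ hnd, List.countP_cons]
    by_cases hxL : x ∈ L <;> simp [hxL, hmem]

-- B's per-group matched-course total
def pvN (counts : PySem.Dict String Int) (p : String × List String) : Int :=
  ((PySem.Set.ofList (p.2.map pvNorm)).map (fun m => counts.getD m 0)).sum

theorem pvN_eq (cc : List (String × String × Int)) (p : String × List String) :
    pvN (cc.foldl (fun d c => d.insert c.2.1 (d.getD c.2.1 0 + 1)) PySem.Dict.empty) p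
      = ((cc.countP (fun c => decide (c.2.1 ∈ p.2.map pvNorm)) : Nat) : Int) := by
  unfold pvN
  rw [List.map_congr_left (fun m _ => pv_counts_getD cc m), pv_sum_set_count]
  rw [List.countP_map]
  congr 1


-- ---- A's per-course step, canonicalized ----

def pvStepA (pg : List (String × List String)) (msc : List String)
    (d : PySem.Dict String Int) (c : String × String × Int) : PySem.Dict String Int :=
  let d1 := (PySem.Dict.ofList pg).items.foldl
      (pvStep (fun p => c.2.1 ∈ p.2.map pvNorm) (fun _ v => max (v - 1) 0)) d
  if c.2.1 ∈ msc.map pvNorm then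
    match d1.get? "MSC" with
    | none => d1
    | some v => d1.insert "MSC" (max (v - c.2.2) 0)
  else d1

theorem pvA_eq (cc : List (String × String × Int)) (pg : List (String × List String))
    (msc : List String) (gl : List (String × Int)) :
    update_group_limits cc pg msc gl = (cc.foldl (pvStepA pg msc) (PySem.Dict.ofList gl)).items := by
  unfold update_group_limits
  congr 1
  apply PySem.List.foldl_congr_mem
  intro d c _
  unfold pvStepA
  rw [pvA_inner_canon c.2.1]
  by_cases hm : c.2.1 ∈ msc.map pvNorm
  · simp only [hm, if_true]
    exact pvA_msc_canon _ _
  · simp only [hm, if_false]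

theorem pv_nd_items (pg : List (String × List String)) :
    ((PySem.Dict.ofList pg).items.map Prod.fst).Nodup :=
  PySem.Dict.nodup_keys_ofList pg

theorem pvStepA_keys (pg : List (String × List String)) (msc : List String)
    (d : PySem.Dict String Int) (c : String × String × Int) :
    (pvStepA pg msc d c).keys = d.keys := by
  unfold pvStepA
  have h1 : ((PySem.Dict.ofList pg).items.foldl
      (pvStep (fun p => c.2.1 ∈ p.2.map pvNorm) (fun _ v => max (v - 1) 0)) d).keys = d.keys :=
    pv_foldl_keys_inv _ (fun d p => pvStep_keys _ _ d p) _ d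
  by_cases hm : c.2.1 ∈ msc.map pvNorm
  · simp only [hm, if_true]
    cases hg : ((PySem.Dict.ofList pg).items.foldl
        (pvStep (fun p => c.2.1 ∈ p.2.map pvNorm) (fun _ v => max (v - 1) 0)) d).get? "MSC" with
    | none => exact h1
    | some v =>
      rw [PySem.Dict.keys_insert_of_contains _ _ (by rw [PySem.Dict.contains_eq_isSome_get?, hg]; rfl)]
      exact h1
  · simp only [hm, if_false]
    exact h1

theorem pvStepA_getD (pg : List (String × List String)) (msc : List String)
    (K0 : List String) (k : String) (d : PySem.Dict String Int) (c : String × String × Int)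
    (hd : d.keys = K0) :
    (pvStepA pg msc d c).getD k 0 = pvPhiA pg msc K0 k (d.getD k 0) c := by
  unfold pvStepA pvPhiA
  have hfk : ((PySem.Dict.ofList pg).items.foldl
      (pvStep (fun p => c.2.1 ∈ p.2.map pvNorm) (fun _ v => max (v - 1) 0)) d).keys = K0 := by
    rw [pv_foldl_keys_inv _ (fun d p => pvStep_keys _ _ d p) _ d, hd]
  have hfold := pv_assoc_fold (fun p => c.2.1 ∈ p.2.map pvNorm) (fun _ v => max (v - 1) 0) k
      (PySem.Dict.ofList pg).items d (pv_nd_items pg)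
  rw [PySem.Dict.contains_eq_decide_mem_keys, hd] at hfold
  have hfold' : ((PySem.Dict.ofList pg).items.foldl
      (pvStep (fun p => c.2.1 ∈ p.2.map pvNorm) (fun _ v => max (v - 1) 0)) d).getD k 0 =
      (match (PySem.Dict.ofList pg).items.find? (fun p => p.1 == k) with
       | some p => if c.2.1 ∈ p.2.map pvNorm ∧ k ∈ K0 then max (d.getD k 0 - 1) 0 else d.getD k 0
       | none => d.getD k 0) := by
    rw [hfold]
    cases hf : (PySem.Dict.ofList pg).items.find? (fun p => p.1 == k) with
    | none => rfl
    | some p => simp only [decide_eq_true_eq]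
  by_cases hm : c.2.1 ∈ msc.map pvNorm
  · simp only [hm, if_true, true_and]
    cases hg : ((PySem.Dict.ofList pg).items.foldl
        (pvStep (fun p => c.2.1 ∈ p.2.map pvNorm) (fun _ v => max (v - 1) 0)) d).get? "MSC" with
    | none =>
      have hnot : ¬ ("MSC" ∈ K0) := by
        intro hmem
        have := PySem.Dict.contains_eq_isSome_get? ((PySem.Dict.ofList pg).items.foldl
          (pvStep (fun p => c.2.1 ∈ p.2.map pvNorm) (fun _ v => max (v - 1) 0)) d) "MSC"
        rw [hg, PySem.Dict.contains_eq_decide_mem_keys, hfk] at this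
        simp [hmem] at this
      rw [hfold']
      simp [hnot]
    | some v =>
      have hmem : "MSC" ∈ K0 := by
        have := PySem.Dict.contains_eq_isSome_get? ((PySem.Dict.ofList pg).items.foldl
          (pvStep (fun p => c.2.1 ∈ p.2.map pvNorm) (fun _ v => max (v - 1) 0)) d) "MSC"
        rw [hg, PySem.Dict.contains_eq_decide_mem_keys, hfk] at this
        exact of_decide_eq_true (by rw [this]; rfl)
      have hv : v = ((PySem.Dict.ofList pg).items.foldl
          (pvStep (fun p => c.2.1 ∈ p.2.map pvNorm) (fun _ v => max (v - 1) 0)) d).getD "MSC" 0 :=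
        (PySem.Dict.getD_of_get?_eq_some _ 0 hg).symm
      by_cases hkM : k = "MSC"
      · subst hkM
        rw [PySem.Dict.getD_insert_self, hv, hfold']
        simp [hmem]
      · rw [PySem.Dict.getD_insert_of_ne _ _ _ hkM, hfold']
        simp [hkM]
  · simp only [hm, if_false, false_and, and_false]
    exact hfold'

-- ---- the per-key scalar comparison ----

theorem pv_scalar_eq (cc : List (String × String × Int)) (pg : List (String × List String))
    (msc : List String) (K0 : List String) (k : String) (hk : k ∈ K0)
    (hpre3 : "MSC" ∉ pg.map Prod.fst
      ∨ (∀ c ∈ cc, c.2.1 ∈ msc.map pvNorm → 0 ≤ c.2.2)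
      ∨ (∀ p ∈ (PySem.Dict.ofList pg : PySem.Dict String (List String)).items,
           p.1 = "MSC" → ∀ c ∈ cc, c.2.1 ∉ p.2.map pvNorm))
    (v0 : Int) (N : (String × List String) → Int)
    (hN : ∀ p, N p = ((cc.countP (fun c => decide (c.2.1 ∈ p.2.map pvNorm)) : Nat) : Int)) :
    cc.foldl (pvPhiA pg msc K0 k) v0 =
      (let v1 := match (PySem.Dict.ofList pg).items.find? (fun p => p.1 == k) with
        | some p => if N p ≠ 0 ∧ k ∈ K0 then max (v0 - N p) 0 else v0
        | none => v0
       let matched := (cc.filter (fun c => decide (c.2.1 ∈ msc.map pvNorm))).map (fun c => c.2.2)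
       if k = "MSC" ∧ matched ≠ [] ∧ "MSC" ∈ K0 then
         matched.foldl (fun a c => max (a - c) 0) v1
       else v1) := by
  by_cases hkM : k = "MSC"
  · subst hkM
    cases hf : (PySem.Dict.ofList pg).items.find? (fun p => p.1 == "MSC") with
    | none =>
      have hphi : pvPhiA pg msc K0 "MSC" =
          fun v c => if c.2.1 ∈ msc.map pvNorm then max (v - c.2.2) 0 else v := by
        funext v c
        simp [pvPhiA, hf, hk]
      rw [hphi, PySem.List.foldl_ite_eq_foldl_filter
            (p := fun c : String × String × Int => c.2.1 ∈ msc.map pvNorm)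
            (f := fun a c => max (a - c.2.2) 0),
          ← List.foldl_map (f := fun c : String × String × Int => c.2.2)
            (g := fun a c => max (a - c) 0)]
      by_cases hmz : (cc.filter (fun c => decide (c.2.1 ∈ msc.map pvNorm))).map (fun c => c.2.2) = []
      · rw [hmz]
        simp
      · simp only []
        rw [if_pos (And.intro trivial (And.intro hmz hk))]
    | some p =>
      have hp1 : p.1 = "MSC" := by simpa using List.find?_some hf
      rcases hpre3 with h | hnn | h
      · exfalso
        apply h
        rw [← hp1]
        exact (pv_mem_keys_ofList pg p.1).mp
          (PySem.Dict.mem_keys_of_mem_items _ (List.mem_of_find?_eq_some hf))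
      · have hphi : pvPhiA pg msc K0 "MSC" =
            fun v c => if c.2.1 ∈ msc.map pvNorm then
                max ((if c.2.1 ∈ p.2.map pvNorm then max (v - 1) 0 else v) - c.2.2) 0
              else (if c.2.1 ∈ p.2.map pvNorm then max (v - 1) 0 else v) := by
          funext v c
          simp [pvPhiA, hf, hk]
        rw [hphi, pv_clamp2_fold (fun c : String × String × Int => c.2.1 ∈ p.2.map pvNorm)
              (fun c : String × String × Int => c.2.1 ∈ msc.map pvNorm) (fun c => c.2.2) cc hnn v0]
        simp only [hk, hN, true_and, and_true]
        have hmn : ∀ a ∈ (cc.filter (fun c => decide (c.2.1 ∈ msc.map pvNorm))).map (fun c => c.2.2), 0 ≤ a := by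
          intro a ha
          obtain ⟨b, hb, rfl⟩ := List.mem_map.mp ha
          have h2 := List.mem_filter.mp hb
          exact hnn b h2.1 (of_decide_eq_true h2.2)
        by_cases hcz : cc.countP (fun c => decide (c.2.1 ∈ p.2.map pvNorm)) = 0 <;>
          by_cases hfz : cc.filter (fun c => decide (c.2.1 ∈ msc.map pvNorm)) = []
        · rw [if_pos ⟨hcz, hfz⟩, hfz]
          simp only [List.map_nil]
          rw [if_neg (fun h => h rfl), if_neg (by rw [hcz]; simp)]
        · have hmz : (cc.filter (fun c => decide (c.2.1 ∈ msc.map pvNorm))).map (fun c => c.2.2) ≠ [] := by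
            simpa using hfz
          rw [if_neg (fun h => hfz h.2), if_pos hmz, if_neg (by rw [hcz]; simp),
              pv_fold_clamp_nonneg _ hmn hmz v0, hcz]
          push_cast
          omega
        · rw [if_neg (fun h => hcz h.1), hfz]
          simp only [List.map_nil, List.sum_nil]
          rw [if_neg (fun h => h rfl), if_pos (by exact_mod_cast hcz)]
          omega
        · have hmz : (cc.filter (fun c => decide (c.2.1 ∈ msc.map pvNorm))).map (fun c => c.2.2) ≠ [] := by
            simpa using hfz
          rw [if_neg (fun h => hcz h.1), if_pos hmz,
              if_pos (by exact_mod_cast hcz), pv_fold_clamp_nonneg _ hmn hmz _]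
          have hS : 0 ≤ ((cc.filter (fun c => decide (c.2.1 ∈ msc.map pvNorm))).map (fun c => c.2.2)).sum :=
            List.sum_nonneg hmn
          have hC : (0 : Int) ≤ ((cc.countP (fun c => decide (c.2.1 ∈ p.2.map pvNorm)) : Nat) : Int) :=
            Nat.cast_nonneg _
          omega
      · -- the "MSC" group is never matched: it behaves exactly like an absent entry
        have hP0 : ∀ c ∈ cc, c.2.1 ∉ p.2.map pvNorm := h p (List.mem_of_find?_eq_some hf) hp1
        rw [PySem.List.foldl_congr_mem cc (pvPhiA pg msc K0 "MSC")
              (fun (v : Int) (c : String × String × Int) =>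
                if c.2.1 ∈ msc.map pvNorm then max (v - c.2.2) 0 else v)
              v0 (fun v c hc => by simp [pvPhiA, hf, hk, hP0 c hc]),
            PySem.List.foldl_ite_eq_foldl_filter
              (p := fun c : String × String × Int => c.2.1 ∈ msc.map pvNorm)
              (f := fun a c => max (a - c.2.2) 0),
            ← List.foldl_map (f := fun c : String × String × Int => c.2.2)
              (g := fun a c => max (a - c) 0)]
        have hN0 : N p = 0 := by
          rw [hN p, List.countP_eq_zero.mpr (fun c hc => by simpa using hP0 c hc)]
          rfl
        simp only [hN0]
        by_cases hmz : (cc.filter (fun c => decide (c.2.1 ∈ msc.map pvNorm))).map (fun c => c.2.2) = []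
        · rw [hmz]
          rw [if_neg (fun hcon => hcon.2.1 rfl), if_neg (fun hcon => hcon.1 rfl)]
          rfl
        · rw [if_neg (show ¬((0 : Int) ≠ 0 ∧ "MSC" ∈ K0) from fun hcon => hcon.1 rfl),
              if_pos (And.intro trivial (And.intro hmz hk))]
  · cases hf : (PySem.Dict.ofList pg).items.find? (fun p => p.1 == k) with
    | none =>
      have hphi : pvPhiA pg msc K0 k = fun v _ => v := by
        funext v c
        simp [pvPhiA, hf, hkM]
      rw [hphi, PySem.List.foldl_ignore]
      simp [hkM]
    | some p =>
      have hphi : pvPhiA pg msc K0 k =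
          fun v c => if c.2.1 ∈ p.2.map pvNorm then max (v - 1) 0 else v := by
        funext v c
        simp [pvPhiA, hf, hkM, hk]
      rw [hphi, PySem.List.foldl_ite_eq_foldl_filter
            (p := fun c : String × String × Int => c.2.1 ∈ p.2.map pvNorm)
            (f := fun a _ => max (a - 1) 0)]
      simp only [hk, hN, hkM, and_true, false_and, if_false]
      by_cases hfz : cc.filter (fun c => decide (c.2.1 ∈ p.2.map pvNorm)) = []
      · rw [hfz, List.countP_eq_length_filter, hfz]
        simp
      · rw [pv_fold_clamp_one _ hfz v0]
        rw [List.countP_eq_length_filter]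
        have hlen : (cc.filter (fun c => decide (c.2.1 ∈ p.2.map pvNorm))).length ≠ 0 := by
          simpa [List.length_eq_zero_iff] using hfz
        simp only [ne_eq, Nat.cast_eq_zero, hlen, not_false_eq_true, if_true]


-- ---- B's group loop, canonicalized ----

theorem pvB_step_canon (counts : PySem.Dict String Int) :
    (fun (d : PySem.Dict String Int) (p : String × List String) =>
       let members : PySem.Set String := PySem.Set.ofList (p.2.map pvNorm)
       let n : Int := (members.map (fun m => counts.getD m 0)).sum
       if n ≠ 0 then
         match d.get? p.1 with
         | none => d
         | some v => d.insert p.1 (max (v - n) 0)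
       else d)
    = pvStep (fun p => pvN counts p ≠ 0) (fun p v => max (v - pvN counts p) 0) := by
  funext d p
  rfl

theorem pv_filter_msc (cc : List (String × String × Int)) (msc : List String) :
    cc.filter (fun c => decide (c.2.1 ∈ PySem.Set.ofList (msc.map pvNorm)))
      = cc.filter (fun c => decide (c.2.1 ∈ msc.map pvNorm)) :=
  List.filter_congr (fun x _ => by simp [PySem.Set.mem_ofList])

-- ===== VERDICT (by name: the statement is the Claim_ definition above) =====
set_option maxHeartbeats 2000000 in
theorem update_group_limits_spec : Claim_equal_update_group_limits := by
  unfold Claim_equal_update_group_limits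
  intro cc pg msc gl _ hpre
  obtain ⟨-, -, hpre3⟩ := hpre
  unfold Spec_update_group_limits
  rw [pvA_eq]
  unfold update_group_limits_alt
  simp only [pvB_step_canon, pv_filter_msc]
  have hndK : (PySem.Dict.ofList gl : PySem.Dict String Int).keys.Nodup := PySem.Dict.nodup_keys_ofList gl
  have hdAkeys : (cc.foldl (pvStepA pg msc) (PySem.Dict.ofList gl : PySem.Dict String Int)).keys = (PySem.Dict.ofList gl : PySem.Dict String Int).keys := pv_foldl_keys_inv _ (pvStepA_keys pg msc) cc (PySem.Dict.ofList gl : PySem.Dict String Int)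
  have hd1keys : ((PySem.Dict.ofList pg).items.foldl (pvStep (fun p => pvN (cc.foldl (fun d c => d.insert c.2.1 (d.getD c.2.1 0 + 1)) PySem.Dict.empty) p ≠ 0) (fun p v => max (v - pvN (cc.foldl (fun d c => d.insert c.2.1 (d.getD c.2.1 0 + 1)) PySem.Dict.empty) p) 0)) (PySem.Dict.ofList gl : PySem.Dict String Int)).keys = (PySem.Dict.ofList gl : PySem.Dict String Int).keys :=
    pv_foldl_keys_inv _ (fun d p => pvStep_keys _ _ d p) _ (PySem.Dict.ofList gl : PySem.Dict String Int)
  have hd1val : ∀ k, ((PySem.Dict.ofList pg).items.foldl (pvStep (fun p => pvN (cc.foldl (fun d c => d.insert c.2.1 (d.getD c.2.1 0 + 1)) PySem.Dict.empty) p ≠ 0) (fun p v => max (v - pvN (cc.foldl (fun d c => d.insert c.2.1 (d.getD c.2.1 0 + 1)) PySem.Dict.empty) p) 0)) (PySem.Dict.ofList gl : PySem.Dict String Int)).getD k 0 =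
      (match (PySem.Dict.ofList pg).items.find? (fun p => p.1 == k) with
       | some p => if pvN (cc.foldl (fun d c => d.insert c.2.1 (d.getD c.2.1 0 + 1)) PySem.Dict.empty) p ≠ 0 ∧ k ∈ (PySem.Dict.ofList gl : PySem.Dict String Int).keys then
           max ((PySem.Dict.ofList gl : PySem.Dict String Int).getD k 0 - pvN (cc.foldl (fun d c => d.insert c.2.1 (d.getD c.2.1 0 + 1)) PySem.Dict.empty) p) 0 else (PySem.Dict.ofList gl : PySem.Dict String Int).getD k 0
       | none => (PySem.Dict.ofList gl : PySem.Dict String Int).getD k 0) := by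
    intro k
    have h := pv_assoc_fold (fun p => pvN (cc.foldl (fun d c => d.insert c.2.1 (d.getD c.2.1 0 + 1)) PySem.Dict.empty) p ≠ 0) (fun p v => max (v - pvN (cc.foldl (fun d c => d.insert c.2.1 (d.getD c.2.1 0 + 1)) PySem.Dict.empty) p) 0) k
      (PySem.Dict.ofList pg).items (PySem.Dict.ofList gl : PySem.Dict String Int) (pv_nd_items pg)
    rw [PySem.Dict.contains_eq_decide_mem_keys] at h
    rw [h]
    cases hf : (PySem.Dict.ofList pg).items.find? (fun p => p.1 == k) with
    | none => rfl
    | some p => simp only [decide_eq_true_eq]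
  have hAval : ∀ k, k ∈ (PySem.Dict.ofList gl : PySem.Dict String Int).keys → (cc.foldl (pvStepA pg msc) (PySem.Dict.ofList gl : PySem.Dict String Int)).getD k 0 =
      (if k = "MSC" ∧ ((cc.filter (fun c => decide (c.2.1 ∈ msc.map pvNorm))).map (fun c => c.2.2)) ≠ [] ∧ "MSC" ∈ (PySem.Dict.ofList gl : PySem.Dict String Int).keys then
         ((cc.filter (fun c => decide (c.2.1 ∈ msc.map pvNorm))).map (fun c => c.2.2)).foldl (fun a c => max (a - c) 0) (((PySem.Dict.ofList pg).items.foldl (pvStep (fun p => pvN (cc.foldl (fun d c => d.insert c.2.1 (d.getD c.2.1 0 + 1)) PySem.Dict.empty) p ≠ 0) (fun p v => max (v - pvN (cc.foldl (fun d c => d.insert c.2.1 (d.getD c.2.1 0 + 1)) PySem.Dict.empty) p) 0)) (PySem.Dict.ofList gl : PySem.Dict String Int)).getD k 0)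
       else ((PySem.Dict.ofList pg).items.foldl (pvStep (fun p => pvN (cc.foldl (fun d c => d.insert c.2.1 (d.getD c.2.1 0 + 1)) PySem.Dict.empty) p ≠ 0) (fun p v => max (v - pvN (cc.foldl (fun d c => d.insert c.2.1 (d.getD c.2.1 0 + 1)) PySem.Dict.empty) p) 0)) (PySem.Dict.ofList gl : PySem.Dict String Int)).getD k 0) := by
    intro k hk
    have h1 := (pv_scalar_transfer (pvStepA pg msc) (pvPhiA pg msc (PySem.Dict.ofList gl : PySem.Dict String Int).keys k) (PySem.Dict.ofList gl : PySem.Dict String Int).keys k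
        (fun d c hd => ⟨by rw [pvStepA_keys, hd], pvStepA_getD pg msc (PySem.Dict.ofList gl : PySem.Dict String Int).keys k d c hd⟩)
        cc (PySem.Dict.ofList gl : PySem.Dict String Int) rfl).2
    rw [h1, pv_scalar_eq cc pg msc (PySem.Dict.ofList gl : PySem.Dict String Int).keys k hk hpre3 ((PySem.Dict.ofList gl : PySem.Dict String Int).getD k 0)
          (pvN (cc.foldl (fun d c => d.insert c.2.1 (d.getD c.2.1 0 + 1)) PySem.Dict.empty)) (fun p => pvN_eq cc p)]
    simp only []
    rw [← hd1val k]
  by_cases hM0 : ((cc.filter (fun c => decide (c.2.1 ∈ msc.map pvNorm))).map (fun c => c.2.2)) = []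
  · rw [if_neg (not_not_intro hM0)]
    rw [PySem.Dict.items_eq_map_keys (cc.foldl (pvStepA pg msc) (PySem.Dict.ofList gl : PySem.Dict String Int)) (by rw [hdAkeys]; exact hndK) 0,
        PySem.Dict.items_eq_map_keys ((PySem.Dict.ofList pg).items.foldl (pvStep (fun p => pvN (cc.foldl (fun d c => d.insert c.2.1 (d.getD c.2.1 0 + 1)) PySem.Dict.empty) p ≠ 0) (fun p v => max (v - pvN (cc.foldl (fun d c => d.insert c.2.1 (d.getD c.2.1 0 + 1)) PySem.Dict.empty) p) 0)) (PySem.Dict.ofList gl : PySem.Dict String Int)) (by rw [hd1keys]; exact hndK) 0, hdAkeys, hd1keys]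
    apply List.map_congr_left
    intro k hk
    rw [hAval k hk, if_neg (fun h => h.2.1 hM0)]
  · rw [if_pos hM0]
    cases hg : ((PySem.Dict.ofList pg).items.foldl (pvStep (fun p => pvN (cc.foldl (fun d c => d.insert c.2.1 (d.getD c.2.1 0 + 1)) PySem.Dict.empty) p ≠ 0) (fun p v => max (v - pvN (cc.foldl (fun d c => d.insert c.2.1 (d.getD c.2.1 0 + 1)) PySem.Dict.empty) p) 0)) (PySem.Dict.ofList gl : PySem.Dict String Int)).get? "MSC" with
    | none =>
      have hnot : "MSC" ∉ (PySem.Dict.ofList gl : PySem.Dict String Int).keys := by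
        intro hmem
        have h := PySem.Dict.contains_eq_isSome_get? ((PySem.Dict.ofList pg).items.foldl (pvStep (fun p => pvN (cc.foldl (fun d c => d.insert c.2.1 (d.getD c.2.1 0 + 1)) PySem.Dict.empty) p ≠ 0) (fun p v => max (v - pvN (cc.foldl (fun d c => d.insert c.2.1 (d.getD c.2.1 0 + 1)) PySem.Dict.empty) p) 0)) (PySem.Dict.ofList gl : PySem.Dict String Int)) "MSC"
        rw [hg, PySem.Dict.contains_eq_decide_mem_keys, hd1keys] at h
        simp [hmem] at h
      rw [PySem.Dict.items_eq_map_keys (cc.foldl (pvStepA pg msc) (PySem.Dict.ofList gl : PySem.Dict String Int)) (by rw [hdAkeys]; exact hndK) 0,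
          PySem.Dict.items_eq_map_keys ((PySem.Dict.ofList pg).items.foldl (pvStep (fun p => pvN (cc.foldl (fun d c => d.insert c.2.1 (d.getD c.2.1 0 + 1)) PySem.Dict.empty) p ≠ 0) (fun p v => max (v - pvN (cc.foldl (fun d c => d.insert c.2.1 (d.getD c.2.1 0 + 1)) PySem.Dict.empty) p) 0)) (PySem.Dict.ofList gl : PySem.Dict String Int)) (by rw [hd1keys]; exact hndK) 0, hdAkeys, hd1keys]
      apply List.map_congr_left
      intro k hk
      rw [hAval k hk, if_neg (fun h => hnot h.2.2)]
    | some v =>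
      have hmem : "MSC" ∈ (PySem.Dict.ofList gl : PySem.Dict String Int).keys := by
        have h := PySem.Dict.contains_eq_isSome_get? ((PySem.Dict.ofList pg).items.foldl (pvStep (fun p => pvN (cc.foldl (fun d c => d.insert c.2.1 (d.getD c.2.1 0 + 1)) PySem.Dict.empty) p ≠ 0) (fun p v => max (v - pvN (cc.foldl (fun d c => d.insert c.2.1 (d.getD c.2.1 0 + 1)) PySem.Dict.empty) p) 0)) (PySem.Dict.ofList gl : PySem.Dict String Int)) "MSC"
        rw [hg, PySem.Dict.contains_eq_decide_mem_keys, hd1keys] at h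
        exact of_decide_eq_true (by rw [h]; rfl)
      have hv : v = ((PySem.Dict.ofList pg).items.foldl (pvStep (fun p => pvN (cc.foldl (fun d c => d.insert c.2.1 (d.getD c.2.1 0 + 1)) PySem.Dict.empty) p ≠ 0) (fun p v => max (v - pvN (cc.foldl (fun d c => d.insert c.2.1 (d.getD c.2.1 0 + 1)) PySem.Dict.empty) p) 0)) (PySem.Dict.ofList gl : PySem.Dict String Int)).getD "MSC" 0 := (PySem.Dict.getD_of_get?_eq_some _ 0 hg).symm
      have hcont : ((PySem.Dict.ofList pg).items.foldl (pvStep (fun p => pvN (cc.foldl (fun d c => d.insert c.2.1 (d.getD c.2.1 0 + 1)) PySem.Dict.empty) p ≠ 0) (fun p v => max (v - pvN (cc.foldl (fun d c => d.insert c.2.1 (d.getD c.2.1 0 + 1)) PySem.Dict.empty) p) 0)) (PySem.Dict.ofList gl : PySem.Dict String Int)).contains "MSC" = true := by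
        rw [PySem.Dict.contains_eq_isSome_get?, hg]; rfl
      have hkeysI : (((PySem.Dict.ofList pg).items.foldl (pvStep (fun p => pvN (cc.foldl (fun d c => d.insert c.2.1 (d.getD c.2.1 0 + 1)) PySem.Dict.empty) p ≠ 0) (fun p v => max (v - pvN (cc.foldl (fun d c => d.insert c.2.1 (d.getD c.2.1 0 + 1)) PySem.Dict.empty) p) 0)) (PySem.Dict.ofList gl : PySem.Dict String Int)).insert "MSC" (((cc.filter (fun c => decide (c.2.1 ∈ msc.map pvNorm))).map (fun c => c.2.2)).foldl (fun a c => max (a - c) 0) v)).keys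
          = (PySem.Dict.ofList gl : PySem.Dict String Int).keys := by
        rw [PySem.Dict.keys_insert_of_contains _ _ hcont, hd1keys]
      rw [PySem.Dict.items_eq_map_keys (cc.foldl (pvStepA pg msc) (PySem.Dict.ofList gl : PySem.Dict String Int)) (by rw [hdAkeys]; exact hndK) 0,
          PySem.Dict.items_eq_map_keys _ (by rw [hkeysI]; exact hndK) 0, hdAkeys, hkeysI]
      apply List.map_congr_left
      intro k hk
      by_cases hkM : k = "MSC"
      · subst hkM
        rw [hAval _ hk, if_pos ⟨rfl, hM0, hmem⟩, PySem.Dict.getD_insert_self, hv]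
      · rw [hAval k hk, if_neg (fun h => hkM h.1), PySem.Dict.getD_insert_of_ne _ _ _ hkM]
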